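-- pv_equiv track=rewrite | github.com/DedRobin/codewars | Python/6pyu/Separating Strings.py | sep_str
-- ===== SOURCE A (Python) =====
-- def sep_str(st):
--     st=[list(x) for x in st.split()]
--     max_lenght=max([len(row) for row in st])
--     for x in st:
--         if len(x)<max_lenght:
--             x.extend(['']*(max_lenght-len(x)))
--     new_st=[]
--     for column in range(max_lenght):
--         new_st.append([row[column] for row in st])
--     return new_st
-- ===== SOURCE B (Python) =====
-- def sep_str(st):
--     # Streaming transpose: one pass over the words, growing the column list
--     # in place; no max-width computation, no padding pass, no column indexing.
--     cols = []
--     seen = 0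
--     for w in st.split():
--         for i, ch in enumerate(w):
--             if i == len(cols):
--                 cols.append([''] * seen)
--             cols[i].append(ch)
--         for col in cols[len(w):]:
--             col.append('')
--         seen += 1
--     return cols
-- ===== Notes on version B (the rewrite author's own statement) =====
-- stated objective: alternative
-- what changed: B builds the transpose in a single streaming pass over the words, growing and extending the column lists incrementally, instead of A's three staged passes (max width, pad every word, index each column).
-- crash fix: On empty or whitespace-only input A raises ValueError (max of an empty list) while B returns []. — e.g. on sep_str(" "): A raises ValueError, B returns []
import Mathlib
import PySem

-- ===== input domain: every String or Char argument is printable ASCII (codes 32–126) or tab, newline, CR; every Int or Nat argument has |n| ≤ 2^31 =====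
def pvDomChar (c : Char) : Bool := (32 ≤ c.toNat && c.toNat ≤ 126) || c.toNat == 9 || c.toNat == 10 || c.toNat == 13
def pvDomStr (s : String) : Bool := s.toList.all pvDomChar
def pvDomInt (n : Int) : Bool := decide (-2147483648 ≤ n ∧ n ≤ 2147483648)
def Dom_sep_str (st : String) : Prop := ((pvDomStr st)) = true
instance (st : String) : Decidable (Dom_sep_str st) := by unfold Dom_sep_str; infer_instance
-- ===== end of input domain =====

-- B builds the transpose in one streaming pass over the words (growing the column
-- lists incrementally) instead of A's staged max-width / padding / column-index passes
-- (objective: alternative). Equivalence is about the return value.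

-- ===== PORT A =====
-- list(x) turns a word into its list of one-character strings
def pvChars (w : String) : List String := w.toList.map (fun c => String.ofList [c])

def sep_str (st : String) : List (List String) :=
  -- st=[list(x) for x in st.split()]
  let rows := (PySem.Str.split₀ st).map pvChars
  -- max_lenght=max([len(row) for row in st]); max([]) raises ValueError (excluded by Pre_), total via getD
  let maxLen := (PySem.List.max? (rows.map (fun r => r.length)) (fun y => y)).getD 0
  -- padding loop: x.extend(['']*(max_lenght-len(x)))
  let padded := rows.map (fun x => if x.length < maxLen then x ++ List.replicate (maxLen - x.length) "" else x)
  -- for column in range(max_lenght): new_st.append([row[column] for row in st])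
  -- row[column] is always in range after padding, so getD with a dummy default is exact here
  (List.range maxLen).map (fun col => padded.map (fun row => row.getD col ""))

-- ===== PORT B =====
-- inner body of B's loop over one word w: walk the existing columns and w's
-- characters in parallel ('for i, ch in enumerate(w): …'), creating a fresh
-- column ['']*seen when i == len(cols); once w is exhausted, append '' to
-- every leftover column ('for col in cols[len(w):]: col.append("")')
def pvAddWord : List (List String) → Nat → List String → List (List String)
  | cols, _, [] => cols.map (fun c => c ++ [""])
  | [], seen, ch :: ws => (List.replicate seen "" ++ [ch]) :: pvAddWord [] seen ws
  | c :: cols, seen, ch :: ws => (c ++ [ch]) :: pvAddWord cols seen ws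

def sep_str_alt (st : String) : List (List String) :=
  -- cols = []; seen = 0; for w in st.split(): <pvAddWord>; seen += 1; return cols
  (((PySem.Str.split₀ st).map pvChars).foldl
    (fun (s : List (List String) × Nat) w => (pvAddWord s.1 s.2 w, s.2 + 1)) ([], 0)).1

-- ===== PRECONDITION & SPEC =====
-- Pre_ excludes empty/whitespace-only input: there A's max([]) raises ValueError.
def Pre_sep_str (st : String) : Prop := PySem.Str.split₀ st ≠ []
instance (st : String) : Decidable (Pre_sep_str st) := by unfold Pre_sep_str; infer_instance
def pvWitness_sep_str : String := "ab c"

-- On empty or whitespace-only input A raises ValueError (max of an empty list); B returns [].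
def Raises_sep_str (st : String) : Prop := PySem.Str.split₀ st = []
instance (st : String) : Decidable (Raises_sep_str st) := by unfold Raises_sep_str; infer_instance
def pvRaiseWitness_sep_str : String := " "
def pvRaiseWitnessOut_sep_str : List (List String) := []

def Spec_sep_str (st : String) (out : List (List String)) : Prop := out = sep_str_alt st
instance (st : String) (out : List (List String)) : Decidable (Spec_sep_str st out) := by unfold Spec_sep_str; infer_instance

-- ===== CLAIM (what is proved, stated in full; the proofs are below) =====
def Claim_equal_sep_str : Prop := ∀ (st : String), Dom_sep_str st → Pre_sep_str st → Spec_sep_str st (sep_str st)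
def Claim_raises_sep_str : Prop := (∀ (st : String), Dom_sep_str st → Raises_sep_str st → ¬ Pre_sep_str st) ∧ (Dom_sep_str (pvRaiseWitness_sep_str) ∧ Raises_sep_str (pvRaiseWitness_sep_str) ∧ sep_str_alt (pvRaiseWitness_sep_str) = pvRaiseWitnessOut_sep_str)

-- ===== LEMMAS AND PROOFS =====

-- maximum of the row lengths, in foldr form
def pvG (rows : List (List String)) : Nat := rows.foldr (fun r a => max r.length a) 0

-- the common transpose both programs compute
def pvT (rows : List (List String)) : List (List String) :=
  (List.range (pvG rows)).map (fun col => rows.map (fun r => r.getD col ""))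

theorem pv_foldl_max_eq (t : List Nat) : ∀ x : Nat, t.foldl max x = max x (t.foldr max 0) := by
  induction t with
  | nil => intro x; simp
  | cons y t ih =>
    intro x
    simp only [List.foldl_cons, List.foldr_cons, ih (max x y)]
    omega

theorem pvF_eq_G (rows : List (List String)) :
    (PySem.List.max? (rows.map (fun r => r.length)) (fun y => y)).getD 0 = pvG rows := by
  cases rows with
  | nil => simp [PySem.List.max?, pvG]
  | cons r t =>
    simp only [List.map_cons, PySem.List.max?_id_cons, Option.getD_some, pvG]
    rw [pv_foldl_max_eq]
    simp [List.foldr_map]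

theorem pv_pad_getD (r : List String) (M col : Nat) :
    (if r.length < M then r ++ List.replicate (M - r.length) "" else r).getD col "" =
      r.getD col "" := by
  split_ifs with h
  · rcases Nat.lt_or_ge col r.length with hc | hc
    · rw [List.getD_eq_getElem?_getD, List.getElem?_append_left hc, ← List.getD_eq_getElem?_getD]
    · rw [List.getD_eq_getElem?_getD, List.getElem?_append_right hc, List.getElem?_replicate]
      rw [List.getD_eq_getElem?_getD, List.getElem?_eq_none (by omega)]
      split_ifs <;> simp
  · rfl

-- A computes pvT
theorem pvA_eq_T (rows : List (List String)) :
    (List.range ((PySem.List.max? (rows.map (fun r => r.length)) (fun y => y)).getD 0)).map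
      (fun col => (rows.map (fun x =>
        if x.length < (PySem.List.max? (rows.map (fun r => r.length)) (fun y => y)).getD 0 then
          x ++ List.replicate ((PySem.List.max? (rows.map (fun r => r.length)) (fun y => y)).getD 0 - x.length) ""
        else x)).map (fun row => row.getD col "")) = pvT rows := by
  rw [pvF_eq_G, pvT]
  apply List.map_congr_left
  intro col _
  rw [List.map_map]
  exact List.map_congr_left fun r _ => pv_pad_getD r (pvG rows) col

theorem pv_map_range_getD (l : List (List String)) (d : List String) :
    (List.range l.length).map (fun i => l.getD i d) = l := by
  induction l with
  | nil => simp
  | cons x t ih =>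
    rw [List.length_cons, List.range_succ_eq_map, List.map_cons, List.map_map]
    simp only [List.getD_cons_zero, Function.comp_def, List.getD_cons_succ]
    rw [ih]

theorem pvAddWord_spec (w : List String) : ∀ (cols : List (List String)) (seen : Nat),
    pvAddWord cols seen w =
      (List.range (max cols.length w.length)).map
        (fun i => cols.getD i (List.replicate seen "") ++ [w.getD i ""]) := by
  induction w with
  | nil =>
    intro cols seen
    rw [pvAddWord]
    simp only [List.length_nil, Nat.max_zero, List.getD_nil]
    conv_lhs => rw [← pv_map_range_getD cols (List.replicate seen "")]
    rw [List.map_map]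
    rfl
  | cons ch ws ih =>
    intro cols seen
    cases cols with
    | nil =>
      rw [pvAddWord, ih [] seen]
      simp only [List.length_nil, Nat.zero_max, List.length_cons, List.getD_nil]
      rw [List.range_succ_eq_map, List.map_cons, List.map_map]
      simp [Function.comp_def]
    | cons c cols' =>
      rw [pvAddWord, ih cols' seen]
      simp only [List.length_cons]
      rw [Nat.succ_max_succ, List.range_succ_eq_map, List.map_cons, List.map_map]
      simp [Function.comp_def]

theorem pvG_le {rows : List (List String)} {r : List String} (h : r ∈ rows) :
    r.length ≤ pvG rows := by
  induction rows with
  | nil => simp at h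
  | cons x t ih =>
    rcases List.mem_cons.mp h with rfl | h
    · exact Nat.le_max_left _ _
    · exact le_trans (ih h) (Nat.le_max_right _ _)

theorem pvG_append (rows : List (List String)) (w : List String) :
    pvG (rows ++ [w]) = max (pvG rows) w.length := by
  have key : ∀ (rs : List (List String)) (b : Nat),
      rs.foldr (fun r a => max r.length a) b = max (pvG rs) b := by
    intro rs
    induction rs with
    | nil => intro b; simp [pvG]
    | cons x t ih =>
      intro b
      rw [List.foldr_cons, ih b]
      have hx : pvG (x :: t) = max x.length (pvG t) := rfl
      rw [hx]
      omega
  show (rows ++ [w]).foldr (fun r a => max r.length a) 0 = max (pvG rows) w.length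
  rw [List.foldr_append, key]
  simp

theorem pv_T_getD (rows : List (List String)) (i : Nat) :
    (pvT rows).getD i (List.replicate rows.length "") =
      rows.map (fun r => r.getD i "") := by
  rcases Nat.lt_or_ge i (pvG rows) with h | h
  · rw [pvT, List.getD_eq_getElem?_getD, List.getElem?_map, List.getElem?_range h]
    rfl
  · rw [pvT, List.getD_eq_getElem?_getD, List.getElem?_eq_none (by simpa using h)]
    simp only [Option.getD_none]
    symm
    rw [List.eq_replicate_iff]
    refine ⟨by simp, ?_⟩
    intro b hb
    rcases List.mem_map.mp hb with ⟨r, hr, rfl⟩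
    rw [List.getD_eq_getElem?_getD, List.getElem?_eq_none (le_trans (pvG_le hr) h)]
    rfl

theorem pvAddWord_T (rows : List (List String)) (w : List String) :
    pvAddWord (pvT rows) rows.length w = pvT (rows ++ [w]) := by
  have hlen : (pvT rows).length = pvG rows := by simp [pvT]
  rw [pvAddWord_spec, hlen]
  conv_rhs => rw [pvT, pvG_append]
  apply List.map_congr_left
  intro i _
  rw [pv_T_getD]
  simp

theorem pv_fold_T : ∀ (ws done : List (List String)),
    (ws.foldl (fun (s : List (List String) × Nat) w => (pvAddWord s.1 s.2 w, s.2 + 1))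
      (pvT done, done.length)) = (pvT (done ++ ws), done.length + ws.length) := by
  intro ws
  induction ws with
  | nil => intro done; simp
  | cons w t ih =>
    intro done
    rw [List.foldl_cons, pvAddWord_T]
    have h1 : done.length + 1 = (done ++ [w]).length := by simp
    rw [h1, ih (done ++ [w])]
    have h2 : (done ++ [w]) ++ t = done ++ w :: t := by simp
    rw [h2]
    congr 1
    simp only [List.length_append, List.length_cons, List.length_nil]
    omega

theorem pvB_eq_T (rows : List (List String)) :
    (rows.foldl (fun (s : List (List String) × Nat) w => (pvAddWord s.1 s.2 w, s.2 + 1))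
      ([], 0)).1 = pvT rows := by
  have h0 : (([] : List (List String)), 0) = (pvT [], ([] : List (List String)).length) := by
    simp [pvT, pvG]
  rw [h0, pv_fold_T]
  simp

-- ===== VERDICT (by name: the statement is the Claim_ definition above) =====
theorem sep_str_spec : Claim_equal_sep_str := by
  intro st _ _
  unfold Spec_sep_str sep_str_alt sep_str
  rw [pvB_eq_T]
  exact pvA_eq_T ((PySem.Str.split₀ st).map pvChars)

def sep_str_raises : Claim_raises_sep_str := by
  unfold Claim_raises_sep_str
  exact ⟨fun st _ h hp => hp h, by decide⟩
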